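-- pv_equiv track=rewrite | github.com/paularguello07/Fashion_garments_measurements | dataset/labeling.py | find_same_lines
-- ===== SOURCE A (Python) =====
-- def find_same_lines(all_lines, all_options, file_names):
--     same_lines_full = []
--     counter_last = 0
--     for i in range(len(all_options)):
--         same_lines = []
--         for j in range(len(all_lines)):
--             if all_lines[j]== all_options[i]:
--                 same_lines.append(file_names[j])
--         if len(same_lines) > 1:
--             counter_last += 1
--         same_lines_full.append(same_lines)
--     return same_lines_full, counter_last
-- ===== SOURCE B (Python) =====
-- def find_same_lines(all_lines, all_options, file_names):
--     groups = {}
--     for line, name in zip(all_lines, file_names):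
--         groups.setdefault(line, []).append(name)
--     same_lines_full = [groups.get(opt, []) for opt in all_options]
--     counter_last = 0
--     for g in same_lines_full:
--         if len(g) > 1:
--             counter_last += 1
--     return same_lines_full, counter_last
-- ===== Notes on version B (the rewrite author's own statement) =====
-- stated objective: faster
-- what changed: Replace the per-option rescan of all_lines by one dict built from zip(all_lines, file_names) grouping filenames by line, then a lookup per option.
import Mathlib
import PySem

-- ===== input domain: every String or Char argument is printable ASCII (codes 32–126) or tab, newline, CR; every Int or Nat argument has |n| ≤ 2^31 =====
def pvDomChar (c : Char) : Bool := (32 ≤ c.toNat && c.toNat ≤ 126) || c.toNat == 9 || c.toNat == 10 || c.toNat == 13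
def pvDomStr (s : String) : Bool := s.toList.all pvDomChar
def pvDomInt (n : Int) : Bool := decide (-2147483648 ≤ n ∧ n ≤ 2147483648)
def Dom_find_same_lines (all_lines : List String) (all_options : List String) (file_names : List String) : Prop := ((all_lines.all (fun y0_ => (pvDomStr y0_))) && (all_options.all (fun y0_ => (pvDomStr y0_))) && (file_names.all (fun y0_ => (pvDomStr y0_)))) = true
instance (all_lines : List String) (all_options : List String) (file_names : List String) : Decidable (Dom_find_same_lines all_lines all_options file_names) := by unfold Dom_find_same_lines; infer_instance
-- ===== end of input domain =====

-- B replaces A's per-option rescan of all_lines by one dict grouping filenames by line (O(n+m) vs O(n*m));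
-- equality of the RETURN value is proved on Pre_ (where A does not raise IndexError).

-- ===== PORT A =====
-- literal transliteration of A; file_names[j] is ported with pyGetD "" — its out-of-range case
-- (Python's IndexError) is excluded by Pre_find_same_lines.
def find_same_lines (all_lines : List String) (all_options : List String) (file_names : List String) : List (List String) × Int :=
  (PySem.List.pyRange 0 (all_options.length : Int) 1).foldl
    (fun (st : List (List String) × Int) i =>
      let same_lines := (PySem.List.pyRange 0 (all_lines.length : Int) 1).foldl
        (fun (s : List String) j =>
          if PySem.List.pyGetD all_lines j "" == PySem.List.pyGetD all_options i "" then
            s ++ [PySem.List.pyGetD file_names j ""]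
          else s) []
      (st.1 ++ [same_lines], if same_lines.length > 1 then st.2 + 1 else st.2))
    ([], 0)

-- ===== PORT B =====
-- groups.setdefault(line, []).append(name) mutates the dict value in place; ported value-wise as
-- modify line [] (· ++ [name]) (same resulting mapping).
def find_same_lines_alt (all_lines : List String) (all_options : List String) (file_names : List String) : List (List String) × Int :=
  let groups := (all_lines.zip file_names).foldl
    (fun (d : PySem.Dict String (List String)) p => d.modify p.1 [] (· ++ [p.2])) PySem.Dict.empty
  let same_lines_full := all_options.map (fun opt => groups.getD opt [])
  let counter_last := same_lines_full.foldl (fun (c : Int) g => if g.length > 1 then c + 1 else c) 0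
  (same_lines_full, counter_last)

-- ===== PRECONDITION & SPEC =====
-- Pre_ excludes exactly the inputs on which A raises IndexError: a line beyond file_names' length
-- that equals some option (A never returns there).
def Pre_find_same_lines (all_lines : List String) (all_options : List String) (file_names : List String) : Prop :=
  ∀ j : Nat, j < all_lines.length → file_names.length ≤ j → all_lines.getD j "" ∉ all_options
instance (all_lines : List String) (all_options : List String) (file_names : List String) : Decidable (Pre_find_same_lines all_lines all_options file_names) := by unfold Pre_find_same_lines; infer_instance
def pvWitness_find_same_lines : List String × List String × List String := (["a", "b", "a"], ["a", "c"], ["f1", "f2", "f3"])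

def Spec_find_same_lines (all_lines : List String) (all_options : List String) (file_names : List String) (out : List (List String) × Int) : Prop := out = find_same_lines_alt all_lines all_options file_names
instance (all_lines : List String) (all_options : List String) (file_names : List String) (out : List (List String) × Int) : Decidable (Spec_find_same_lines all_lines all_options file_names out) := by unfold Spec_find_same_lines; infer_instance

-- ===== CLAIM (what is proved, stated in full; the proofs are below) =====
def Claim_equal_find_same_lines : Prop := ∀ (all_lines : List String) (all_options : List String) (file_names : List String), Dom_find_same_lines all_lines all_options file_names → Pre_find_same_lines all_lines all_options file_names → Spec_find_same_lines all_lines all_options file_names (find_same_lines all_lines all_options file_names)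

-- ===== LEMMAS AND PROOFS =====

-- A's outer loop over a pair state, split componentwise.
theorem pvPairFold (l : List Int) (g : Int → List String) (a : List (List String)) (b : Int) :
    l.foldl (fun (st : List (List String) × Int) i =>
      (st.1 ++ [g i], if (g i).length > 1 then st.2 + 1 else st.2)) (a, b)
    = (a ++ l.map g, l.foldl (fun (c : Int) i => if (g i).length > 1 then c + 1 else c) b) := by
  induction l generalizing a b with
  | nil => simp
  | cons x xs ih => simp [ih, List.append_assoc]

-- A's inner scan (as a filtered index range) equals the filtered zip, given no match beyond file_names.
theorem pvInnerNat (ls fs : List String) (opt : String)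
    (h : ∀ j : Nat, j < ls.length → fs.length ≤ j → ls.getD j "" ≠ opt) :
    ((List.range ls.length).filter (fun j => ls.getD j "" == opt)).map (fun j => fs.getD j "")
      = ((ls.zip fs).filter (fun p => p.1 == opt)).map (·.2) := by
  induction ls generalizing fs with
  | nil => simp
  | cons l ls ih =>
    cases fs with
    | nil =>
      have hnil : List.filter (fun j => (l :: ls).getD j "" == opt) (List.range (l :: ls).length) = [] := by
        apply List.filter_eq_nil_iff.mpr
        intro j hj
        simp only [List.mem_range] at hj
        simpa using h j hj (Nat.zero_le j)
      rw [hnil]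
      simp
    | cons f fs =>
      have hstep : ∀ j : Nat, j < ls.length → fs.length ≤ j → ls.getD j "" ≠ opt := by
        intro j hj hf
        have := h (j + 1) (by simpa using Nat.succ_lt_succ hj) (by simpa using Nat.succ_le_succ hf)
        simpa using this
      have := ih fs hstep
      simp only [List.length_cons, List.range_succ_eq_map, List.filter_cons,
        List.filter_map, List.zip_cons_cons]
      by_cases hl : l = opt
      · simp [hl, ← this, List.map_map, Function.comp_def]
      · simp [← this, List.map_map, Function.comp_def,
          show (l == opt) = false from by simpa using hl]

-- ===== VERDICT (by name: the statement is the Claim_ definition above) =====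
theorem find_same_lines_spec : Claim_equal_find_same_lines := by
  intro all_lines all_options file_names _ hpre
  unfold Spec_find_same_lines
  simp only [find_same_lines, find_same_lines_alt]
  rw [pvPairFold (PySem.List.pyRange 0 (all_options.length : Int) 1)
    (fun i => (PySem.List.pyRange 0 (all_lines.length : Int) 1).foldl
      (fun (s : List String) j =>
        if PySem.List.pyGetD all_lines j "" == PySem.List.pyGetD all_options i "" then
          s ++ [PySem.List.pyGetD file_names j ""]
        else s) []) [] 0]
  have hGmem : ∀ opt ∈ all_options,
      (PySem.List.pyRange 0 (all_lines.length : Int) 1).foldl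
        (fun (s : List String) j =>
          if PySem.List.pyGetD all_lines j "" == opt then
            s ++ [PySem.List.pyGetD file_names j ""]
          else s) []
      = ((all_lines.zip file_names).foldl
          (fun (d : PySem.Dict String (List String)) p => d.modify p.1 [] (· ++ [p.2]))
          PySem.Dict.empty).getD opt [] := by
    intro opt hopt
    rw [PySem.List.foldl_append_if, PySem.Dict.getD_foldl_modify_append, PySem.Dict.getD_empty]
    rw [← pvInnerNat all_lines file_names opt (fun j hj hf he => hpre j hj hf (he ▸ hopt))]
    simp [PySem.List.pyRange_zero_natCast, List.filter_map, List.map_map, Function.comp_def]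
  have h1 : ([] : List (List String)) ++ (PySem.List.pyRange 0 (all_options.length : Int) 1).map
      (fun i => (PySem.List.pyRange 0 (all_lines.length : Int) 1).foldl
        (fun (s : List String) j =>
          if PySem.List.pyGetD all_lines j "" == PySem.List.pyGetD all_options i "" then
            s ++ [PySem.List.pyGetD file_names j ""]
          else s) [])
      = all_options.map (fun opt => ((all_lines.zip file_names).foldl
          (fun (d : PySem.Dict String (List String)) p => d.modify p.1 [] (· ++ [p.2]))
          PySem.Dict.empty).getD opt []) := by
    rw [List.nil_append,
      show (fun i => (PySem.List.pyRange 0 (all_lines.length : Int) 1).foldl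
        (fun (s : List String) j =>
          if PySem.List.pyGetD all_lines j "" == PySem.List.pyGetD all_options i "" then
            s ++ [PySem.List.pyGetD file_names j ""]
          else s) [])
        = ((fun opt => (PySem.List.pyRange 0 (all_lines.length : Int) 1).foldl
            (fun (s : List String) j =>
              if PySem.List.pyGetD all_lines j "" == opt then
                s ++ [PySem.List.pyGetD file_names j ""]
              else s) []) ∘ (fun i => PySem.List.pyGetD all_options i "")) from rfl,
      ← List.map_map, PySem.List.map_pyGetD_pyRange_zero']
    exact List.map_congr_left hGmem
  have h2 : (PySem.List.pyRange 0 (all_options.length : Int) 1).foldl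
      (fun (c : Int) i => if ((fun i => (PySem.List.pyRange 0 (all_lines.length : Int) 1).foldl
        (fun (s : List String) j =>
          if PySem.List.pyGetD all_lines j "" == PySem.List.pyGetD all_options i "" then
            s ++ [PySem.List.pyGetD file_names j ""]
          else s) []) i).length > 1 then c + 1 else c) 0
      = (all_options.map (fun opt => ((all_lines.zip file_names).foldl
          (fun (d : PySem.Dict String (List String)) p => d.modify p.1 [] (· ++ [p.2]))
          PySem.Dict.empty).getD opt [])).foldl
          (fun (c : Int) g => if g.length > 1 then c + 1 else c) 0 := by
    rw [PySem.List.foldl_pyRange_zero_pyGetD' all_options ""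
      (fun (c : Int) v => if ((PySem.List.pyRange 0 (all_lines.length : Int) 1).foldl
        (fun (s : List String) j =>
          if PySem.List.pyGetD all_lines j "" == v then
            s ++ [PySem.List.pyGetD file_names j ""]
          else s) []).length > 1 then c + 1 else c) 0]
    rw [List.foldl_map]
    apply PySem.List.foldl_congr_mem
    intro c opt hopt
    rw [hGmem opt hopt]
  exact Prod.ext h1 h2
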